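-- pv_equiv track=rewrite | github.com/maehrm/tessoku | A70.py | bfs
-- ===== SOURCE A (Python) =====
-- from collections import deque
--
-- def bfs(src, dst, operations):
--     if src == dst:
--         return 0
--     visited = {src}
--     que = deque()
--     que.append((src, 0))
--     while que:
--         cur, cnt = que.popleft()
--         for op in operations:
--             nxt = cur ^ op
--             if nxt == dst:
--                 return cnt + 1
--             if nxt not in visited:
--                 visited.add(nxt)
--                 que.append((nxt, cnt + 1))
--     return -1
-- ===== SOURCE B (Python) =====
-- def bfs(src, dst, operations):
--     # Algebraic reformulation instead of graph search with a visited set: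
--     # reaching dst in k moves means dst == src ^ (XOR of k chosen operations,
--     # repetitions allowed).  Duplicate choices cancel under XOR, so a minimal
--     # combination uses each operation at most once and only sizes
--     # k = 1 .. len(operations) need be examined.  combos holds every value
--     # obtainable as an XOR of exactly k operations; these sets evolve
--     # deterministically, so the scan stops once they repeat with period 2.
--     if src == dst:
--         return 0
--     target = src ^ dst
--     combos, prev = {0}, set()
--     for k in range(1, len(operations) + 1):
--         nxt = set()
--         for c in combos:
--             for op in operations:
--                 v = c ^ op
--                 if v == target:
--                     return k
--                 nxt.add(v)
--         if nxt == prev:  # exact-k sets now alternate forever; target cannot appear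
--             return -1
--         combos, prev = nxt, combos
--     return -1
-- ===== Notes on version B (the rewrite author's own statement) =====
-- stated objective: alternative
-- what changed: Replaces the queue-and-visited-set BFS over states with an algebraic computation: it looks for the least k such that src^dst is an XOR of exactly k operations, iterating the XOR-of-exactly-k value sets, capping k at len(operations) because duplicate picks cancel under XOR, and stopping early once these sets repeat with period 2.
import Mathlib
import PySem

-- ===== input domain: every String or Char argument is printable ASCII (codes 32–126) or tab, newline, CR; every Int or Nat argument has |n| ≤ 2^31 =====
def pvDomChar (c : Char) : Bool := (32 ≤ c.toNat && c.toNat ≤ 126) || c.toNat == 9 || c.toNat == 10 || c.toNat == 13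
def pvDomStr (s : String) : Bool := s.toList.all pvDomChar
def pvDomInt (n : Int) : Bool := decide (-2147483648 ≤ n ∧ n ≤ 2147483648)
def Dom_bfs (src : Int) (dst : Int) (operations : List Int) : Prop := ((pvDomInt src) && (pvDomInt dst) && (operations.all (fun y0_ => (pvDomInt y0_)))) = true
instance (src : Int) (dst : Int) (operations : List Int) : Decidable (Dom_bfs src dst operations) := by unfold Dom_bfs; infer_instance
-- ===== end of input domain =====

-- B replaces the queue-and-visited-set BFS by an algebraic computation: the least k such that
-- src^dst is an XOR of exactly k operations, iterating the exact-k XOR value sets (k capped at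
-- len(operations) since duplicate picks cancel, with a period-2 stabilisation early exit);
-- return values proved equal (objective: alternative).
-- A's loop is made total with fuel 2 ^ operations.length, a totality guard only: BFS enqueues each
-- distinct value src^(XOR of a subset of operations) at most once (counting argument in loopL_main).

-- ===== PORT A =====
-- inner 'for op in operations' loop of A: none = 'return cnt+1' fired; some = (visited, newly queued pairs)
def stepA (dst : Int) (cur : Int) (cnt : Int) :
    List Int → PySem.Set Int → List (Int × Int) → Option (PySem.Set Int × List (Int × Int))
  | [], visited, adds => some (visited, adds)
  | op :: rest, visited, adds =>
    let nxt := PySem.Int.bxor cur op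
    if nxt = dst then none
    else if visited.contains nxt then stepA dst cur cnt rest visited adds
    else stepA dst cur cnt rest (visited.add nxt) (adds ++ [(nxt, cnt + 1)])

-- 'while que:' loop of A (deque as list, popleft from the front, append at the back)
def loopA (dst : Int) (ops : List Int) :
    Nat → List (Int × Int) → PySem.Set Int → Int
  | _, [], _ => -1
  | 0, _ :: _, _ => -1
  | fuel + 1, (cur, cnt) :: rest, visited =>
    match stepA dst cur cnt ops visited [] with
    | none => cnt + 1
    | some (v', adds) => loopA dst ops fuel (rest ++ adds) v'

def bfs (src : Int) (dst : Int) (operations : List Int) : Int :=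
  if src = dst then 0
  else loopA dst operations (2 ^ operations.length) [(src, 0)] (PySem.Set.ofList [src])

-- ===== PORT B =====
-- inner 'for op in operations' loop of B: none = 'return k' fired
def innerT (target : Int) (c : Int) : List Int → PySem.Set Int → Option (PySem.Set Int)
  | [], nxt => some nxt
  | op :: rest, nxt =>
    let v := PySem.Int.bxor c op
    if v = target then none
    else innerT target c rest (nxt.add v)

-- 'for c in combos' loop of B
def outerT (target : Int) (ops : List Int) : List Int → PySem.Set Int → Option (PySem.Set Int)
  | [], nxt => some nxt
  | c :: cs, nxt =>
    match innerT target c ops nxt with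
    | none => none
    | some nxt' => outerT target ops cs nxt'

-- 'for k in range(1, len(operations) + 1)' loop of B; r = iterations remaining, k = current size,
-- prev = the exact-(k-2) set (initially empty), for the period-2 stabilisation early exit
def loopB (ops : List Int) (target : Int) : Nat → Int → PySem.Set Int → PySem.Set Int → Int
  | 0, _, _, _ => -1
  | r + 1, k, combos, prev =>
    match outerT target ops combos PySem.Set.empty with
    | none => k
    | some nxt =>
      if PySem.Set.equal nxt prev then -1
      else loopB ops target r (k + 1) nxt combos

def bfs_alt (src : Int) (dst : Int) (operations : List Int) : Int :=
  if src = dst then 0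
  else loopB operations (PySem.Int.bxor src dst) operations.length 1 (PySem.Set.ofList [0]) PySem.Set.empty

-- ===== PRECONDITION & SPEC =====
def Spec_bfs (src : Int) (dst : Int) (operations : List Int) (out : Int) : Prop := out = bfs_alt src dst operations
instance (src : Int) (dst : Int) (operations : List Int) (out : Int) : Decidable (Spec_bfs src dst operations out) := by unfold Spec_bfs; infer_instance

-- ===== CLAIM (what is proved, stated in full; the proofs are below) =====
def Claim_equal_bfs : Prop := ∀ (src : Int) (dst : Int) (operations : List Int), Dom_bfs src dst operations → Spec_bfs src dst operations (bfs src dst operations)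

-- ===== LEMMAS AND PROOFS =====

-- ---- XOR algebra over Int ----
theorem bxor_pp {a b : Int} (ha : 0 ≤ a) (hb : 0 ≤ b) :
    PySem.Int.bxor a b = ((a.toNat ^^^ b.toNat : Nat) : Int) := by
  simp [PySem.Int.bxor, ha, hb]
theorem bxor_pn {a b : Int} (ha : 0 ≤ a) (hb : b < 0) :
    PySem.Int.bxor a b = -((a.toNat ^^^ (-b-1).toNat : Nat) : Int) - 1 := by
  simp [PySem.Int.bxor, ha, Int.not_le.mpr hb]
theorem bxor_np {a b : Int} (ha : a < 0) (hb : 0 ≤ b) :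
    PySem.Int.bxor a b = -(((-a-1).toNat ^^^ b.toNat : Nat) : Int) - 1 := by
  simp [PySem.Int.bxor, Int.not_le.mpr ha, hb]
theorem bxor_nn {a b : Int} (ha : a < 0) (hb : b < 0) :
    PySem.Int.bxor a b = (((-a-1).toNat ^^^ (-b-1).toNat : Nat) : Int) := by
  simp [PySem.Int.bxor, Int.not_le.mpr ha, Int.not_le.mpr hb]

theorem bxor_assoc (a b c : Int) :
    PySem.Int.bxor (PySem.Int.bxor a b) c = PySem.Int.bxor a (PySem.Int.bxor b c) := by
  rcases (by omega : 0 ≤ a ∨ a < 0) with ha | ha <;>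
  rcases (by omega : 0 ≤ b ∨ b < 0) with hb | hb <;>
  rcases (by omega : 0 ≤ c ∨ c < 0) with hc | hc
  · rw [bxor_pp ha hb, bxor_pp hb hc, bxor_pp (Int.natCast_nonneg _) hc,
      bxor_pp ha (Int.natCast_nonneg _)]
    simp [Nat.xor_assoc]
  · rw [bxor_pp ha hb, bxor_pn hb hc, bxor_pn (Int.natCast_nonneg _) hc,
      bxor_pn ha (by omega)]
    simp [Nat.xor_assoc]
  · rw [bxor_pn ha hb, bxor_np hb hc, bxor_np (by omega) hc,
      bxor_pn ha (by omega)]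
    simp [Nat.xor_assoc]
  · rw [bxor_pn ha hb, bxor_nn hb hc, bxor_nn (by omega) hc,
      bxor_pp ha (Int.natCast_nonneg _)]
    simp [Nat.xor_assoc]
  · rw [bxor_np ha hb, bxor_pp hb hc, bxor_np (by omega) hc,
      bxor_np ha (Int.natCast_nonneg _)]
    simp [Nat.xor_assoc]
  · rw [bxor_np ha hb, bxor_pn hb hc, bxor_nn (by omega) hc,
      bxor_nn ha (by omega)]
    simp [Nat.xor_assoc]
  · rw [bxor_nn ha hb, bxor_np hb hc, bxor_pp (Int.natCast_nonneg _) hc,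
      bxor_nn ha (by omega)]
    simp [Nat.xor_assoc]
  · rw [bxor_nn ha hb, bxor_nn hb hc, bxor_pn (Int.natCast_nonneg _) hc,
      bxor_np ha (Int.natCast_nonneg _)]
    simp [Nat.xor_assoc]

theorem zero_bxor (a : Int) : PySem.Int.bxor 0 a = a := by
  rw [PySem.Int.bxor_comm]; exact PySem.Int.bxor_zero a

theorem bxor_cancel (a b : Int) : PySem.Int.bxor a (PySem.Int.bxor a b) = b := by
  rw [← bxor_assoc, PySem.Int.bxor_self, zero_bxor]

-- ---- XOR of a list ----
def xorL (l : List Int) : Int := l.foldl PySem.Int.bxor 0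

theorem foldl_bxor_eq (l : List Int) : ∀ i : Int, l.foldl PySem.Int.bxor i = PySem.Int.bxor i (xorL l) := by
  induction l with
  | nil => intro i; simp [xorL, PySem.Int.bxor_zero]
  | cons b l ih =>
    intro i
    simp only [xorL, List.foldl_cons] at *
    rw [ih (PySem.Int.bxor i b), ih (PySem.Int.bxor 0 b), zero_bxor, bxor_assoc]

theorem xorL_append_singleton (l : List Int) (a : Int) :
    xorL (l ++ [a]) = PySem.Int.bxor (xorL l) a := by
  simp [xorL, List.foldl_append]

theorem xorL_perm {l1 l2 : List Int} (h : l1.Perm l2) : xorL l1 = xorL l2 := by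
  haveI : RightCommutative PySem.Int.bxor :=
    ⟨fun b a1 a2 => by rw [bxor_assoc, bxor_assoc, PySem.Int.bxor_comm a1 a2]⟩
  exact h.foldl_eq 0

theorem nodup_subset_length {l L : List Int} (h1 : l.Nodup) (h2 : l ⊆ L) : l.length ≤ L.length := by
  calc l.length = l.toFinset.card := (List.toFinset_card_of_nodup h1).symm
    _ ≤ L.toFinset.card := Finset.card_le_card (fun a ha => by
        simp only [List.mem_toFinset] at *; exact h2 ha)
    _ ≤ L.length := L.toFinset_card_le

theorem nodup_reduce : ∀ (n : Nat) (l : List Int), l.length ≤ n →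
    ∃ l', l'.Nodup ∧ l' ⊆ l ∧ xorL l' = xorL l := by
  intro n
  induction n with
  | zero =>
    intro l hl
    have : l = [] := List.eq_nil_of_length_eq_zero (Nat.le_zero.mp hl)
    exact ⟨[], List.nodup_nil, by simp [this], by simp [this]⟩
  | succ n ih =>
    intro l hl
    by_cases hnd : l.Nodup
    · exact ⟨l, hnd, fun a ha => ha, rfl⟩
    · obtain ⟨a, hdup⟩ := List.exists_duplicate_iff_not_nodup.mpr hnd
      have ha1 : a ∈ l := hdup.mem
      have hcount : 2 ≤ l.count a := List.duplicate_iff_two_le_count.mp hdup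
      have ha2 : a ∈ l.erase a := by
        have hce : (l.erase a).count a = l.count a - 1 := List.count_erase_self ..
        have : 0 < (l.erase a).count a := by omega
        exact List.count_pos_iff.mp this
      set r := (l.erase a).erase a with hr
      have hperm : l.Perm (a :: a :: r) :=
        (List.perm_cons_erase ha1).trans ((List.perm_cons_erase ha2).cons a)
      have hx : xorL l = xorL r := by
        rw [xorL_perm hperm]
        show List.foldl PySem.Int.bxor 0 (a :: a :: r) = xorL r
        simp only [List.foldl_cons]
        rw [foldl_bxor_eq]
        have : PySem.Int.bxor (PySem.Int.bxor 0 a) a = 0 := by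
          rw [bxor_assoc, PySem.Int.bxor_self, PySem.Int.bxor_zero]
        rw [this]
        exact zero_bxor _
      have hrlen : r.length + 2 = l.length := by
        have := hperm.length_eq
        simpa using this.symm
      obtain ⟨l', h1, h2, h3⟩ := ih r (by omega)
      refine ⟨l', h1, fun b hb => ?_, by rw [h3, hx]⟩
      have : b ∈ r := h2 hb
      exact (List.erase_subset ((List.erase_subset this)))

-- ---- exact-k reachability ----
def ReachN (src : Int) (ops : List Int) : Nat → Int → Prop
  | 0, x => x = src
  | k + 1, x => ∃ y, ReachN src ops k y ∧ ∃ op ∈ ops, x = PySem.Int.bxor y op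

def univList (src : Int) (ops : List Int) : List Int :=
  ops.sublists.map (fun s => PySem.Int.bxor src (xorL s))

theorem reach_iff_list (src : Int) (ops : List Int) : ∀ (k : Nat) (x : Int),
    ReachN src ops k x ↔ ∃ l, l.length = k ∧ (∀ a ∈ l, a ∈ ops) ∧ x = PySem.Int.bxor src (xorL l) := by
  intro k
  induction k with
  | zero =>
    intro x
    constructor
    · intro h
      have h' : x = src := h
      exact ⟨[], rfl, by simp, by simp [xorL, h', PySem.Int.bxor_zero]⟩
    · rintro ⟨l, hl, -, rfl⟩
      have : l = [] := List.eq_nil_of_length_eq_zero hl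
      subst this
      show _ = src
      simp [xorL, PySem.Int.bxor_zero]
  | succ k ih =>
    intro x
    constructor
    · rintro ⟨y, hy, op, hop, rfl⟩
      obtain ⟨l, hl, hmem, rfl⟩ := (ih y).mp hy
      refine ⟨l ++ [op], by simp [hl], ?_, ?_⟩
      · intro a ha
        rcases List.mem_append.mp ha with h | h
        · exact hmem a h
        · simpa using List.mem_singleton.mp h ▸ hop
      · rw [xorL_append_singleton, ← bxor_assoc]
    · rintro ⟨l, hl, hmem, rfl⟩
      rcases List.eq_nil_or_concat l with rfl | ⟨l₀, a, rfl⟩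
      · simp at hl
      · refine ⟨PySem.Int.bxor src (xorL l₀), (ih _).mpr ⟨l₀, by simpa using hl, fun b hb => hmem b (by simp [hb]), rfl⟩, a, hmem a (by simp), ?_⟩
        rw [List.concat_eq_append, xorL_append_singleton, ← bxor_assoc]

theorem reach_bound {src dst : Int} {ops : List Int} {k : Nat} (hsd : src ≠ dst)
    (h : ReachN src ops k dst) : ∃ m, 1 ≤ m ∧ m ≤ ops.length ∧ ReachN src ops m dst := by
  obtain ⟨l, hl, hmem, hdst⟩ := (reach_iff_list src ops k dst).mp h
  obtain ⟨l', hnd, hsub, hx⟩ := nodup_reduce l.length l le_rfl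
  refine ⟨l'.length, ?_, ?_, (reach_iff_list src ops l'.length dst).mpr ⟨l', rfl, fun a ha => hmem a (hsub ha), by rw [hx, ← hdst]⟩⟩
  · rcases l' with _ | ⟨b, l''⟩
    · exfalso
      apply hsd
      have : xorL ([] : List Int) = 0 := by simp [xorL]
      rw [hdst, ← hx, this, PySem.Int.bxor_zero]
    · simp
  · exact nodup_subset_length hnd (fun a ha => hmem a (hsub ha))

theorem mem_univ {src : Int} {ops : List Int} {k : Nat} {x : Int}
    (h : ReachN src ops k x) : x ∈ univList src ops := by
  obtain ⟨l, hl, hmem, hx⟩ := (reach_iff_list src ops k x).mp h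
  obtain ⟨l', hnd, hsub, hxl⟩ := nodup_reduce l.length l le_rfl
  have hsubops : l' ⊆ ops.dedup := fun a ha => List.mem_dedup.mpr (hmem a (hsub ha))
  set s := ops.dedup.filter (fun a => decide (a ∈ l')) with hs
  have hsnd : s.Nodup := (List.nodup_dedup ops).filter _
  have hperm : s.Perm l' := by
    rw [List.perm_ext_iff_of_nodup hsnd hnd]
    intro a
    simp only [hs, List.mem_filter, List.mem_dedup, decide_eq_true_eq]
    exact ⟨fun h => h.2, fun h2 => ⟨List.mem_dedup.mp (hsubops h2), h2⟩⟩
  have hssub : s.Sublist ops := List.filter_sublist.trans (List.dedup_sublist ops)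
  refine List.mem_map.mpr ⟨s, List.mem_sublists.mpr hssub, ?_⟩
  rw [xorL_perm hperm, hxl, ← hx]

theorem reach_shift (src : Int) (ops : List Int) : ∀ (k : Nat) (x : Int),
    ReachN src ops k x ↔ ReachN 0 ops k (PySem.Int.bxor src x) := by
  intro k
  induction k with
  | zero =>
    intro x
    constructor
    · intro h
      have h' : x = src := h
      show PySem.Int.bxor src x = 0
      rw [h']
      exact PySem.Int.bxor_self src
    · intro h
      have h' : PySem.Int.bxor src x = 0 := h
      have h2 := congrArg (PySem.Int.bxor src) h'
      rw [bxor_cancel, PySem.Int.bxor_zero] at h2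
      show x = src
      omega
  | succ k ih =>
    intro x
    constructor
    · rintro ⟨y, hy, op, hop, rfl⟩
      exact ⟨PySem.Int.bxor src y, (ih y).mp hy, op, hop, (bxor_assoc src y op).symm⟩
    · rintro ⟨y', hy', op, hop, hx⟩
      refine ⟨PySem.Int.bxor src y', (ih _).mpr (by rwa [bxor_cancel]), op, hop, ?_⟩
      have h2 := congrArg (PySem.Int.bxor src) hx
      rw [bxor_cancel] at h2
      rw [h2, ← bxor_assoc]

-- ---- B-side loop ----
theorem innerT_none_iff (t c : Int) : ∀ (ops : List Int) (nxt : PySem.Set Int),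
    innerT t c ops nxt = none ↔ ∃ op ∈ ops, PySem.Int.bxor c op = t := by
  intro ops
  induction ops with
  | nil => intro nxt; simp [innerT]
  | cons op rest ih =>
    intro nxt
    simp only [innerT]
    split_ifs with h1
    · simp [h1]
    · rw [ih]
      constructor
      · rintro ⟨o, ho, h⟩; exact ⟨o, by simp [ho], h⟩
      · rintro ⟨o, ho, h⟩
        rcases List.mem_cons.mp ho with rfl | ho'
        · exact absurd h h1
        · exact ⟨o, ho', h⟩

theorem innerT_some_spec (t c : Int) : ∀ (ops : List Int) (nxt nxt' : PySem.Set Int),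
    innerT t c ops nxt = some nxt' →
    (∀ x, x ∈ nxt' ↔ (x ∈ nxt ∨ ∃ op ∈ ops, x = PySem.Int.bxor c op)) := by
  intro ops
  induction ops with
  | nil =>
    intro nxt nxt' heq
    simp only [innerT, Option.some.injEq] at heq
    subst heq
    simp
  | cons op rest ih =>
    intro nxt nxt' heq
    simp only [innerT] at heq
    split_ifs at heq with h1
    have := ih _ _ heq
    intro x
    rw [this x]
    simp only [PySem.Set.mem_add]
    constructor
    · rintro ((h | h) | ⟨o, ho, rfl⟩)
      · exact Or.inl h
      · exact Or.inr ⟨op, by simp, h⟩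
      · exact Or.inr ⟨o, by simp [ho], rfl⟩
    · rintro (h | ⟨o, ho, rfl⟩)
      · exact Or.inl (Or.inl h)
      · rcases List.mem_cons.mp ho with rfl | ho'
        · exact Or.inl (Or.inr rfl)
        · exact Or.inr ⟨o, ho', rfl⟩

theorem outerT_none_iff (t : Int) (ops : List Int) : ∀ (S : List Int) (acc : PySem.Set Int),
    outerT t ops S acc = none ↔ ∃ c ∈ S, ∃ op ∈ ops, PySem.Int.bxor c op = t := by
  intro S
  induction S with
  | nil => intro acc; simp [outerT]
  | cons c cs ih =>
    intro acc
    simp only [outerT]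
    cases hin : innerT t c ops acc with
    | none =>
      simp only [true_iff]
      obtain ⟨op, hop, h⟩ := (innerT_none_iff t c ops acc).mp hin
      exact ⟨c, by simp, op, hop, h⟩
    | some nxt' =>
      rw [ih]
      constructor
      · rintro ⟨c', hc', op, hop, h⟩
        exact ⟨c', by simp [hc'], op, hop, h⟩
      · rintro ⟨c', hc', op, hop, h⟩
        rcases List.mem_cons.mp hc' with rfl | hc''
        · exact absurd ((innerT_none_iff t c' ops acc).mpr ⟨op, hop, h⟩) (by simp [hin])
        · exact ⟨c', hc'', op, hop, h⟩

theorem outerT_some_spec (t : Int) (ops : List Int) : ∀ (S : List Int) (acc nxt : PySem.Set Int),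
    outerT t ops S acc = some nxt →
    (∀ x, x ∈ nxt ↔ (x ∈ acc ∨ ∃ c ∈ S, ∃ op ∈ ops, x = PySem.Int.bxor c op)) := by
  intro S
  induction S with
  | nil =>
    intro acc nxt heq
    simp only [outerT, Option.some.injEq] at heq
    subst heq
    simp
  | cons c cs ih =>
    intro acc nxt heq
    simp only [outerT] at heq
    cases hin : innerT t c ops acc with
    | none => rw [hin] at heq; simp at heq
    | some nxt' =>
      rw [hin] at heq
      have h1 := innerT_some_spec t c ops acc nxt' hin
      have h2 := ih nxt' nxt heq
      intro x
      rw [h2 x, h1 x]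
      constructor
      · rintro ((h | ⟨o, ho, rfl⟩) | ⟨c', hc', o, ho, rfl⟩)
        · exact Or.inl h
        · exact Or.inr ⟨c, by simp, o, ho, rfl⟩
        · exact Or.inr ⟨c', by simp [hc'], o, ho, rfl⟩
      · rintro (h | ⟨c', hc', o, ho, rfl⟩)
        · exact Or.inl (Or.inl h)
        · rcases List.mem_cons.mp hc' with rfl | hc''
          · exact Or.inl (Or.inr ⟨o, ho, rfl⟩)
          · exact Or.inr ⟨c', hc'', o, ho, rfl⟩

-- the set built from an exact-j set is the exact-(j+1) set, provided no hit occurred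
theorem outerT_char {t : Int} {ops : List Int} {S nxt : PySem.Set Int} {j : Nat}
    (hS : ∀ x, x ∈ S ↔ ReachN 0 ops j x) (heq : outerT t ops S PySem.Set.empty = some nxt) :
    ∀ x, x ∈ nxt ↔ ReachN 0 ops (j + 1) x := by
  intro x
  rw [outerT_some_spec t ops S PySem.Set.empty nxt heq x]
  constructor
  · rintro (h | ⟨c, hc, op, hop, rfl⟩)
    · simp [PySem.Set.empty] at h
    · exact ⟨c, (hS c).mp hc, op, hop, rfl⟩
  · rintro ⟨y, hy, op, hop, rfl⟩
    exact Or.inr ⟨y, (hS y).mpr hy, op, hop, rfl⟩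

-- a hit while building from an exact-j set is exactly reachability at j+1
theorem outerT_hit_iff {t : Int} {ops : List Int} {S : PySem.Set Int} {j : Nat}
    (hS : ∀ x, x ∈ S ↔ ReachN 0 ops j x) :
    outerT t ops S PySem.Set.empty = none ↔ ReachN 0 ops (j + 1) t := by
  rw [outerT_none_iff]
  constructor
  · rintro ⟨c, hc, op, hop, h⟩
    exact ⟨c, (hS c).mp hc, op, hop, h.symm⟩
  · rintro ⟨y, hy, op, hop, h⟩
    exact ⟨y, (hS y).mpr hy, op, hop, h.symm⟩

theorem reach_step_congr (ops : List Int) {a b : Nat}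
    (h : ∀ x, ReachN 0 ops a x ↔ ReachN 0 ops b x) :
    ∀ x, ReachN 0 ops (a + 1) x ↔ ReachN 0 ops (b + 1) x := by
  intro x
  constructor
  · rintro ⟨y, hy, op, hop, rfl⟩
    exact ⟨y, (h y).mp hy, op, hop, rfl⟩
  · rintro ⟨y, hy, op, hop, rfl⟩
    exact ⟨y, (h y).mpr hy, op, hop, rfl⟩

theorem reach_period (ops : List Int) (a : Nat)
    (h2 : ∀ x, ReachN 0 ops (a + 2) x ↔ ReachN 0 ops a x) :
    ∀ (s : Nat) (x : Int), ReachN 0 ops (a + 2 + s) x ↔ ReachN 0 ops (a + s) x := by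
  intro s
  induction s with
  | zero => exact h2
  | succ s ih =>
    intro x
    exact reach_step_congr ops ih x

theorem no_future_hit (ops : List Int) (t : Int) (j' : Nat)
    (heq : ∀ x, ReachN 0 ops (j' + 2) x ↔ ReachN 0 ops j' x)
    (h0 : ¬ ReachN 0 ops j' t) (h1 : ¬ ReachN 0 ops (j' + 1) t) :
    ∀ m, j' ≤ m → ¬ ReachN 0 ops m t := by
  intro m
  induction m using Nat.strong_induction_on with
  | _ m ih =>
    intro hm hr
    rcases Nat.lt_or_ge m (j' + 2) with h | h
    · rcases Nat.lt_or_ge m (j' + 1) with h' | h'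
      · have : m = j' := by omega
        exact h0 (this ▸ hr)
      · have : m = j' + 1 := by omega
        exact h1 (this ▸ hr)
    · have hm2 : m = j' + 2 + (m - j' - 2) := by omega
      rw [hm2] at hr
      rw [reach_period ops j' heq (m - j' - 2) t] at hr
      exact ih (j' + (m - j' - 2)) (by omega) (by omega) hr

theorem reach_down (src : Int) (ops : List Int) : ∀ (k : Nat) (x : Int), ReachN src ops k x →
    ∀ i ≤ k, ∃ y, ReachN src ops i y := by
  intro k
  induction k with
  | zero =>
    intro x _ i hi
    have : i = 0 := by omega
    subst this
    exact ⟨src, rfl⟩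
  | succ k ihk =>
    rintro x ⟨y, hy, op, hop, rfl⟩ i hi
    rcases Nat.lt_or_ge i (k + 1) with h | h
    · exact ihk y hy i (by omega)
    · have : i = k + 1 := by omega
      subst this
      exact ⟨PySem.Int.bxor y op, ⟨y, hy, op, hop, rfl⟩⟩

theorem loopB_hit (ops : List Int) (t : Int) (K : Nat)
    (hK : ReachN 0 ops K t) (hmin : ∀ j < K, ¬ ReachN 0 ops j t) :
    ∀ (r j : Nat) (S prev : PySem.Set Int), (∀ x, x ∈ S ↔ ReachN 0 ops j x) →
      (((∀ x, x ∉ prev) ∧ j = 0) ∨ (∃ j', j = j' + 1 ∧ (∀ x, x ∈ prev ↔ ReachN 0 ops j' x))) →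
      j < K → K ≤ j + r → loopB ops t r ((j : Int) + 1) S prev = (K : Int) := by
  intro r
  induction r with
  | zero => intro j S prev _ _ h1 h2; omega
  | succ r ih =>
    intro j S prev hS hprev h1 h2
    by_cases hhit : j + 1 = K
    · have hnone := (outerT_hit_iff hS).mpr (by rw [hhit]; exact hK)
      simp only [loopB, hnone]
      omega
    · cases houter : outerT t ops S PySem.Set.empty with
      | none =>
        exact absurd ((outerT_hit_iff hS).mp houter) (hmin (j + 1) (by omega))
      | some nxt =>
        have hnxt := outerT_char hS houter
        simp only [loopB, houter]
        rw [if_neg ?neg2]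
        · have := ih (j + 1) nxt S hnxt (Or.inr ⟨j, rfl, hS⟩) (by omega) (by omega)
          push_cast at this ⊢
          exact this
        case neg2 =>
          rw [PySem.Set.equal_iff]
          intro hiff
          rcases hprev with ⟨hempty, rfl⟩ | ⟨j', rfl, hprevE⟩
          · obtain ⟨z, hz⟩ := reach_down 0 ops K t hK 1 (by omega)
            exact hempty z ((hiff z).mp ((hnxt z).mpr hz))
          · have heqE : ∀ x, ReachN 0 ops (j' + 2) x ↔ ReachN 0 ops j' x := by
              intro x
              constructor
              · intro hx
                exact (hprevE x).mp ((hiff x).mp ((hnxt x).mpr hx))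
              · intro hx
                exact (hnxt x).mp ((hiff x).mpr ((hprevE x).mpr hx))
            exact no_future_hit ops t j' heqE (hmin j' (by omega)) (hmin (j' + 1) (by omega))
              K (by omega) hK

theorem loopB_miss (ops : List Int) (t : Int) (h : ∀ k, ¬ ReachN 0 ops k t) :
    ∀ (r j : Nat) (S prev : PySem.Set Int), (∀ x, x ∈ S ↔ ReachN 0 ops j x) →
      loopB ops t r ((j : Int) + 1) S prev = -1 := by
  intro r
  induction r with
  | zero => intro j S prev _; rfl
  | succ r ih =>
    intro j S prev hS
    cases houter : outerT t ops S PySem.Set.empty with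
    | none => exact absurd ((outerT_hit_iff hS).mp houter) (h (j + 1))
    | some nxt =>
      have hnxt := outerT_char hS houter
      simp only [loopB, houter]
      by_cases heq : PySem.Set.equal nxt prev = true
      · rw [if_pos heq]
      · rw [if_neg heq]
        have := ih (j + 1) nxt S hnxt
        push_cast at this ⊢
        exact this

-- ---- proof-side level-synchronised form of A's BFS ----
def stepL (dst : Int) (cur : Int) :
    List Int → PySem.Set Int → List Int → Option (PySem.Set Int × List Int)
  | [], visited, nf => some (visited, nf)
  | op :: rest, visited, nf =>
    let nxt := PySem.Int.bxor cur op
    if nxt = dst then none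
    else if visited.contains nxt then stepL dst cur rest visited nf
    else stepL dst cur rest (visited.add nxt) (nf ++ [nxt])

def loopL (dst : Int) (ops : List Int) (fuel : Nat) (frontier nextf : List Int)
    (visited : PySem.Set Int) (depth : Int) : Int :=
  match frontier with
  | [] =>
    if h : nextf = [] then -1
    else loopL dst ops fuel nextf [] visited (depth + 1)
  | c :: fr =>
    match fuel with
    | 0 => -1
    | f + 1 =>
      match stepL dst c ops visited nextf with
      | none => depth + 1
      | some (v', nf') => loopL dst ops f fr nf' v' depth
termination_by (fuel, if frontier = [] then 1 else 0)
decreasing_by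
  · exact Prod.Lex.right _ (by simp [h])
  · exact Prod.Lex.left _ _ (Nat.lt_succ_self f)

-- L's inner loop with accumulator nf is the accumulator-free run with nf prepended
theorem stepL_acc (dst cur : Int) (ops : List Int) (v : PySem.Set Int) (nf : List Int) :
    stepL dst cur ops v nf =
      Option.map (fun r => (r.1, nf ++ r.2)) (stepL dst cur ops v []) := by
  induction ops generalizing v nf with
  | nil => simp [stepL]
  | cons op rest ih =>
    simp only [stepL]
    split_ifs with h1 h2
    · rfl
    · exact ih _ _
    · rw [ih _ (nf ++ [_]), ih _ ([] ++ [_])]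
      cases stepL dst cur rest (v.add _) [] <;> simp

-- A's inner loop is L's inner loop with each queued value paired with cnt+1
theorem step_sim (dst cur cnt : Int) (ops : List Int) (v : PySem.Set Int) :
    stepA dst cur cnt ops v [] =
      Option.map (fun r => (r.1, r.2.map (fun x => (x, cnt + 1)))) (stepL dst cur ops v []) := by
  suffices h : ∀ (acc : List Int) (v : PySem.Set Int),
      stepA dst cur cnt ops v (acc.map (fun x => (x, cnt + 1))) =
        Option.map (fun r => (r.1, r.2.map (fun x => (x, cnt + 1)))) (stepL dst cur ops v acc) by
    simpa using h [] v
  induction ops with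
  | nil => intro acc v; simp [stepA, stepL]
  | cons op rest ih =>
    intro acc v
    simp only [stepA, stepL]
    split_ifs with h1 h2
    · rfl
    · exact ih _ _
    · have h3 := ih (acc ++ [PySem.Int.bxor cur op]) (v.add (PySem.Int.bxor cur op))
      simpa using h3

-- queue-BFS on a queue of one level at depth d followed by the next level at depth d+1
-- is level-BFS: the two forms process the same nodes in the same order
theorem loop_sim (dst : Int) (ops : List Int) :
    ∀ (fuel : Nat) (fr nf : List Int) (v : PySem.Set Int) (d : Int),
      loopA dst ops fuel (fr.map (fun x => (x, d)) ++ nf.map (fun x => (x, d + 1))) v =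
        loopL dst ops fuel fr nf v d := by
  intro fuel fr nf v d
  induction fuel, fr, nf, v, d using loopL.induct dst ops with
  | case1 fuel v d =>
    simp [loopA, loopL]
  | case2 fuel nf v d hne ih =>
    rw [loopL]
    rw [dif_neg hne, ← ih]
    simp
  | case3 nf v d c fr =>
    rw [loopL]
    simp [loopA]
  | case4 nf v d c fr f hnone =>
    rw [loopL]
    have h0 : stepL dst c ops v [] = none := by
      have := stepL_acc dst c ops v nf
      rw [hnone] at this
      cases hs : stepL dst c ops v [] with
      | none => rfl
      | some r => rw [hs] at this; simp at this
    simp only [List.map_cons, List.cons_append, loopA, step_sim, h0, Option.map_none, hnone]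
  | case5 nf v d c fr f v' nf' hsome ih =>
    rw [loopL, hsome]
    have hacc := stepL_acc dst c ops v nf
    rw [hsome] at hacc
    cases hs : stepL dst c ops v [] with
    | none => rw [hs] at hacc; simp at hacc
    | some r =>
      obtain ⟨w, L⟩ := r
      rw [hs] at hacc
      simp only [Option.map_some, Option.some.injEq, Prod.mk.injEq] at hacc
      obtain ⟨hv, hnf⟩ := hacc
      simp only [List.map_cons, List.cons_append, loopA, step_sim, hs, Option.map_some]
      rw [← ih]
      subst hv hnf
      congr 1
      simp [List.map_append, List.append_assoc]

-- ---- characterisation of stepL ----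
theorem stepL_none_iff (dst c : Int) : ∀ (ops : List Int) (V : PySem.Set Int) (nf : List Int),
    stepL dst c ops V nf = none ↔ ∃ op ∈ ops, PySem.Int.bxor c op = dst := by
  intro ops
  induction ops with
  | nil => intro V nf; simp [stepL]
  | cons op rest ih =>
    intro V nf
    simp only [stepL]
    split_ifs with h1 h2
    · simp [h1]
    · rw [ih]
      constructor
      · rintro ⟨o, ho, h⟩; exact ⟨o, by simp [ho], h⟩
      · rintro ⟨o, ho, h⟩
        rcases List.mem_cons.mp ho with rfl | ho'
        · exact absurd h h1
        · exact ⟨o, ho', h⟩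
    · rw [ih]
      constructor
      · rintro ⟨o, ho, h⟩; exact ⟨o, by simp [ho], h⟩
      · rintro ⟨o, ho, h⟩
        rcases List.mem_cons.mp ho with rfl | ho'
        · exact absurd h h1
        · exact ⟨o, ho', h⟩

theorem stepL_some_spec (dst c : Int) : ∀ (ops : List Int) (V : PySem.Set Int) (nf : List Int)
    (V' : PySem.Set Int) (nf' : List Int), (∀ x ∈ nf, x ∈ V) →
    stepL dst c ops V nf = some (V', nf') →
    (∀ x, x ∈ V' ↔ (x ∈ V ∨ ∃ op ∈ ops, x = PySem.Int.bxor c op)) ∧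
    (∀ x, x ∈ nf' ↔ (x ∈ nf ∨ (x ∉ V ∧ ∃ op ∈ ops, x = PySem.Int.bxor c op))) ∧
    (nf.Nodup → nf'.Nodup) ∧ (∀ x ∈ nf', x ∈ V') ∧ (∀ op ∈ ops, PySem.Int.bxor c op ≠ dst) := by
  intro ops
  induction ops with
  | nil =>
    intro V nf V' nf' hsub heq
    simp only [stepL, Option.some.injEq, Prod.mk.injEq] at heq
    obtain ⟨rfl, rfl⟩ := heq
    refine ⟨by simp, by simp, fun h => h, hsub, by simp⟩
  | cons op rest ih =>
    intro V nf V' nf' hsub heq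
    simp only [stepL] at heq
    split_ifs at heq with h1 h2
    · -- visited already contains nxt
      obtain ⟨hV', hnf', hnd, hss, hnh⟩ := ih V nf V' nf' hsub heq
      refine ⟨?_, ?_, hnd, hss, ?_⟩
      · intro x
        rw [hV']
        constructor
        · rintro (h | ⟨o, ho, rfl⟩)
          · exact Or.inl h
          · exact Or.inr ⟨o, by simp [ho], rfl⟩
        · rintro (h | ⟨o, ho, rfl⟩)
          · exact Or.inl h
          · rcases List.mem_cons.mp ho with rfl | ho'
            · exact Or.inl ((PySem.Set.contains_iff V _).mp h2)
            · exact Or.inr ⟨o, ho', rfl⟩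
      · intro x
        rw [hnf']
        constructor
        · rintro (h | ⟨hv, o, ho, rfl⟩)
          · exact Or.inl h
          · exact Or.inr ⟨hv, o, by simp [ho], rfl⟩
        · rintro (h | ⟨hv, o, ho, rfl⟩)
          · exact Or.inl h
          · rcases List.mem_cons.mp ho with rfl | ho'
            · exact absurd ((PySem.Set.contains_iff V _).mp h2) hv
            · exact Or.inr ⟨hv, o, ho', rfl⟩
      · intro o ho
        rcases List.mem_cons.mp ho with rfl | ho'
        · exact h1
        · exact hnh o ho'
    · -- new value added
      have hnin : PySem.Int.bxor c op ∉ V := fun h =>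
        h2 ((PySem.Set.contains_iff V _).mpr h)
      have hsub' : ∀ x ∈ nf ++ [PySem.Int.bxor c op], x ∈ V.add (PySem.Int.bxor c op) := by
        intro x hx
        rcases List.mem_append.mp hx with h | h
        · exact (PySem.Set.mem_add _ _ _).mpr (Or.inl (hsub x h))
        · exact (PySem.Set.mem_add _ _ _).mpr (Or.inr (List.mem_singleton.mp h))
      obtain ⟨hV', hnf', hnd, hss, hnh⟩ := ih _ _ V' nf' hsub' heq
      refine ⟨?_, ?_, ?_, hss, ?_⟩
      · intro x
        rw [hV']
        simp only [PySem.Set.mem_add]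
        constructor
        · rintro ((h | h) | ⟨o, ho, rfl⟩)
          · exact Or.inl h
          · exact Or.inr ⟨op, by simp, h⟩
          · exact Or.inr ⟨o, by simp [ho], rfl⟩
        · rintro (h | ⟨o, ho, rfl⟩)
          · exact Or.inl (Or.inl h)
          · rcases List.mem_cons.mp ho with rfl | ho'
            · exact Or.inl (Or.inr rfl)
            · exact Or.inr ⟨o, ho', rfl⟩
      · intro x
        rw [hnf']
        simp only [List.mem_append, List.mem_singleton, PySem.Set.mem_add]
        constructor
        · rintro ((h | h) | ⟨hv, o, ho, rfl⟩)
          · exact Or.inl h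
          · exact Or.inr ⟨h ▸ hnin, op, by simp, h⟩
          · refine Or.inr ⟨fun hmem => hv (Or.inl hmem), o, by simp [ho], rfl⟩
        · rintro (h | ⟨hv, o, ho, rfl⟩)
          · exact Or.inl (Or.inl h)
          · rcases List.mem_cons.mp ho with rfl | ho'
            · exact Or.inl (Or.inr rfl)
            · by_cases hx : PySem.Int.bxor c o = PySem.Int.bxor c op
              · exact Or.inl (Or.inr hx)
              · exact Or.inr ⟨fun hmem => (by rcases hmem with h | h; exact hv h; exact hx h : False), o, ho', rfl⟩
      · intro hnfnd
        apply hnd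
        rw [List.nodup_append]
        refine ⟨hnfnd, List.nodup_singleton _, ?_⟩
        intro a ha b hb
        have hb' : b = PySem.Int.bxor c op := by simpa using hb
        subst hb'
        intro heq
        exact hnin (heq ▸ hsub a ha)
      · intro o ho
        rcases List.mem_cons.mp ho with rfl | ho'
        · exact h1
        · exact hnh o ho'

-- ---- if one more level adds nothing new and dst was not hit, dst is unreachable ----
theorem stabilize (src dst : Int) (ops : List Int) (dn : Nat) (hsd : src ≠ dst)
    (hlev : ∀ x, x ≠ dst → ReachN src ops (dn + 1) x → ∃ j ≤ dn, ReachN src ops j x)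
    (hno : ∀ j ≤ dn + 1, ¬ ReachN src ops j dst) :
    ∀ k, ¬ ReachN src ops k dst := by
  have main : ∀ k x, ReachN src ops k x → x ≠ dst ∧ ∃ j ≤ dn, ReachN src ops j x := by
    intro k
    induction k with
    | zero =>
      intro x hx
      have hx' : x = src := hx
      subst hx'
      exact ⟨hsd, 0, Nat.zero_le _, rfl⟩
    | succ k ih =>
      rintro x ⟨y, hy, op, hop, rfl⟩
      obtain ⟨hynd, j, hj, hjy⟩ := ih y hy
      have hreach : ReachN src ops (j + 1) (PySem.Int.bxor y op) := ⟨y, hjy, op, hop, rfl⟩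
      have hnd : PySem.Int.bxor y op ≠ dst := by
        intro heq
        exact hno (j + 1) (by omega) (heq ▸ hreach)
      refine ⟨hnd, ?_⟩
      by_cases hj' : j + 1 ≤ dn
      · exact ⟨j + 1, hj', hreach⟩
      · have : j = dn := by omega
        subst this
        exact hlev _ hnd hreach
  intro k hk
  exact (main k dst hk).1 rfl

-- every value at depth dn+1 is within dn or a successor of a listed level-dn node
theorem level_succ (src dst : Int) (ops : List Int) (dn : Nat) (PF : List Int)
    (ilev : ∀ y, y ≠ dst → ReachN src ops dn y → ¬(∃ j < dn, ReachN src ops j y) → y ∈ PF)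
    (inoh : ∀ j ≤ dn, ¬ ReachN src ops j dst) :
    ∀ x, ReachN src ops (dn + 1) x →
      (∃ j ≤ dn, ReachN src ops j x) ∨ ∃ y ∈ PF, ∃ op ∈ ops, x = PySem.Int.bxor y op := by
  rintro x ⟨y, hy, op, hop, rfl⟩
  by_cases hl : ∃ j < dn, ReachN src ops j y
  · obtain ⟨j, hj, hjy⟩ := hl
    exact Or.inl ⟨j + 1, by omega, ⟨y, hjy, op, hop, rfl⟩⟩
  · have hyd : y ≠ dst := fun h => inoh dn le_rfl (h ▸ hy)
    exact Or.inr ⟨y, ilev y hyd hy hl, op, hop, rfl⟩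

-- ---- correctness of the level-synchronised BFS ----
theorem loopL_main (src dst : Int) (ops : List Int) (R : Int) (hsd : src ≠ dst)
    (hR : (∃ K, ReachN src ops K dst ∧ (∀ j < K, ¬ ReachN src ops j dst) ∧ R = (K : Int)) ∨
          ((∀ k, ¬ ReachN src ops k dst) ∧ R = -1)) :
    ∀ (fuel : Nat) (F nf : List Int) (V : PySem.Set Int) (d : Int),
      (∃ (dn : Nat) (P Q : List Int),
        d = (dn : Int) ∧
        (∀ x, x ∈ V ↔ (x ≠ dst ∧ ((∃ j ≤ dn, ReachN src ops j x) ∨ (∃ y ∈ P, ∃ op ∈ ops, x = PySem.Int.bxor y op)))) ∧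
        (∀ x, x ∈ nf ↔ (x ≠ dst ∧ ¬(∃ j ≤ dn, ReachN src ops j x) ∧ (∃ y ∈ P, ∃ op ∈ ops, x = PySem.Int.bxor y op))) ∧
        nf.Nodup ∧
        (∀ y ∈ P, y ≠ dst ∧ ReachN src ops dn y ∧ ¬(∃ j < dn, ReachN src ops j y)) ∧
        (∀ y ∈ F, y ≠ dst ∧ ReachN src ops dn y ∧ ¬(∃ j < dn, ReachN src ops j y)) ∧
        (∀ y, y ≠ dst → ReachN src ops dn y → ¬(∃ j < dn, ReachN src ops j y) → y ∈ P ++ F) ∧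
        (∀ j ≤ dn, ¬ ReachN src ops j dst) ∧
        (∀ y ∈ P, ∀ op ∈ ops, PySem.Int.bxor y op ≠ dst) ∧
        (∀ x ∈ Q, ∃ j ≤ dn, ReachN src ops j x) ∧
        (Q ++ P ++ F).Nodup ∧
        (∀ x ∈ Q ++ P ++ F, x ∈ univList src ops) ∧
        ((univList src ops).length ≤ fuel + Q.length + P.length)) →
      loopL dst ops fuel F nf V d = R := by
  intro fuel F nf V d
  induction fuel, F, nf, V, d using loopL.induct dst ops with
  | case1 fuel v d =>
    rintro ⟨dn, P, Q, rfl, iV, inf, infd, iP, iF, ilev, inoh, inohP, iQ, ind, iu, icnt⟩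
    rw [loopL]
    simp only [dif_pos]
    -- dst is unreachable: the last level added nothing new and never hit dst
    have hPlev : ∀ y, y ≠ dst → ReachN src ops dn y → ¬(∃ j < dn, ReachN src ops j y) → y ∈ P := by
      intro y h1 h2 h3
      have := ilev y h1 h2 h3
      simpa using this
    have hno' : ∀ j ≤ dn + 1, ¬ ReachN src ops j dst := by
      intro j hj hr
      rcases Nat.lt_or_ge j (dn + 1) with h | h
      · exact inoh j (by omega) hr
      · have hj1 : j = dn + 1 := by omega
        subst hj1
        rcases level_succ src dst ops dn P hPlev inoh dst hr with ⟨j', hj', hr'⟩ | ⟨y, hyP, op, hop, heq⟩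
        · exact inoh j' hj' hr'
        · exact inohP y hyP op hop heq.symm
    have hlev : ∀ x, x ≠ dst → ReachN src ops (dn + 1) x → ∃ j ≤ dn, ReachN src ops j x := by
      intro x hxd hx
      rcases level_succ src dst ops dn P hPlev inoh x hx with h | hstep
      · exact h
      · by_contra hnle
        have : x ∈ ([] : List Int) := (inf x).mpr ⟨hxd, hnle, hstep⟩
        simp at this
    have hall : ∀ k, ¬ ReachN src ops k dst := stabilize src dst ops dn hsd hlev hno'
    rcases hR with ⟨K, hK, -, -⟩ | ⟨-, rfl⟩
    · exact absurd hK (hall K)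
    · rfl
  | case2 fuel nf v d hne ih =>
    rintro ⟨dn, P, Q, rfl, iV, inf, infd, iP, iF, ilev, inoh, inohP, iQ, ind, iu, icnt⟩
    rw [loopL, dif_neg hne]
    apply ih
    have hPlev : ∀ y, y ≠ dst → ReachN src ops dn y → ¬(∃ j < dn, ReachN src ops j y) → y ∈ P := by
      intro y h1 h2 h3
      have := ilev y h1 h2 h3
      simpa using this
    have hno' : ∀ j ≤ dn + 1, ¬ ReachN src ops j dst := by
      intro j hj hr
      rcases Nat.lt_or_ge j (dn + 1) with h | h
      · exact inoh j (by omega) hr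
      · have hj1 : j = dn + 1 := by omega
        subst hj1
        rcases level_succ src dst ops dn P hPlev inoh dst hr with ⟨j', hj', hr'⟩ | ⟨y, hyP, op, hop, heq⟩
        · exact inoh j' hj' hr'
        · exact inohP y hyP op hop heq.symm
    have hQP : ∀ x ∈ Q ++ P, ∃ j ≤ dn, ReachN src ops j x := by
      intro x hx
      rcases List.mem_append.mp hx with h | h
      · exact iQ x h
      · exact ⟨dn, le_rfl, (iP x h).2.1⟩
    refine ⟨dn + 1, [], Q ++ P, by push_cast; ring, ?_, ?_, List.nodup_nil, by simp, ?_, ?_, hno', by simp, ?_, ?_, ?_, ?_⟩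
    · -- iV'
      intro x
      rw [iV x]
      simp only [false_and, exists_false, or_false, List.mem_nil_iff]
      constructor
      · rintro ⟨hxd, h | ⟨y, hyP, op, hop, rfl⟩⟩
        · obtain ⟨j, hj, hjx⟩ := h
          exact ⟨hxd, j, by omega, hjx⟩
        · exact ⟨hxd, dn + 1, le_rfl, ⟨y, (iP y hyP).2.1, op, hop, rfl⟩⟩
      · rintro ⟨hxd, j, hj, hjx⟩
        rcases Nat.lt_or_ge j (dn + 1) with h | h
        · exact ⟨hxd, Or.inl ⟨j, by omega, hjx⟩⟩
        · have hj1 : j = dn + 1 := by omega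
          subst hj1
          rcases level_succ src dst ops dn P hPlev inoh x hjx with h2 | h2
          · exact ⟨hxd, Or.inl h2⟩
          · exact ⟨hxd, Or.inr h2⟩
    · -- inf' (new next-frontier is empty)
      intro x
      simp
    · -- iF' = old inf
      intro y hy
      obtain ⟨h1, h2, y', hy'P, op, hop, rfl⟩ := (inf y).mp hy
      have hr1 : ReachN src ops (dn + 1) (PySem.Int.bxor y' op) := ⟨y', (iP y' hy'P).2.1, op, hop, rfl⟩
      refine ⟨h1, hr1, ?_⟩
      intro ⟨j, hj, hjy⟩
      exact h2 ⟨j, by omega, hjy⟩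
    · -- ilev'
      intro y hyd hyr hylt
      have hnle : ¬(∃ j ≤ dn, ReachN src ops j y) := by
        intro ⟨j, hj, hjy⟩
        exact hylt ⟨j, by omega, hjy⟩
      rcases level_succ src dst ops dn P hPlev inoh y hyr with h | hstep
      · exact absurd h hnle
      · simpa using (inf y).mpr ⟨hyd, hnle, hstep⟩
    · -- iQ'
      intro x hx
      obtain ⟨j, hj, hjx⟩ := hQP x hx
      exact ⟨j, by omega, hjx⟩
    · -- ind'
      have hQPnd : (Q ++ P).Nodup := by simpa using ind
      simp only [List.append_nil]
      rw [List.nodup_append]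
      refine ⟨hQPnd, infd, ?_⟩
      intro a ha b hb heq
      obtain ⟨j, hj, hjx⟩ := hQP a ha
      have := (inf b).mp hb
      exact this.2.1 ⟨j, hj, heq ▸ hjx⟩
    · -- iu'
      intro x hx
      simp only [List.append_nil] at hx
      rcases List.mem_append.mp hx with h | h
      · exact iu x (by simpa using h)
      · obtain ⟨-, -, y, hyP, op, hop, rfl⟩ := (inf x).mp h
        have hr1 : ReachN src ops (dn + 1) (PySem.Int.bxor y op) := ⟨y, (iP y hyP).2.1, op, hop, rfl⟩
        exact mem_univ hr1
    · -- icnt'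
      simp only [List.length_append, List.length_nil] at icnt ⊢
      omega
  | case3 nf v d c fr =>
    rintro ⟨dn, P, Q, rfl, iV, inf, infd, iP, iF, ilev, inoh, inohP, iQ, ind, iu, icnt⟩
    exfalso
    have h1 : (Q ++ P ++ (c :: fr)).length ≤ (univList src ops).length :=
      nodup_subset_length ind (fun x hx => iu x hx)
    simp only [List.length_append, List.length_cons] at h1 icnt
    omega
  | case4 nf v d c fr f hnone =>
    rintro ⟨dn, P, Q, rfl, iV, inf, infd, iP, iF, ilev, inoh, inohP, iQ, ind, iu, icnt⟩
    rw [loopL, hnone]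
    obtain ⟨op, hop, heq⟩ := (stepL_none_iff dst c ops v nf).mp hnone
    have hc := iF c (by simp)
    have hreach : ReachN src ops (dn + 1) dst := ⟨c, hc.2.1, op, hop, heq.symm⟩
    rcases hR with ⟨K, hK, hmin, rfl⟩ | ⟨hall, -⟩
    · have hKeq : K = dn + 1 := by
        by_contra hne
        rcases Nat.lt_or_ge K (dn + 1) with h | h
        · exact inoh K (by omega) hK
        · exact hmin (dn + 1) (by omega) hreach
      subst hKeq
      push_cast
      ring
    · exact absurd hreach (hall (dn + 1))
  | case5 nf v d c fr f v' nf' hsome ih =>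
    rintro ⟨dn, P, Q, rfl, iV, inf, infd, iP, iF, ilev, inoh, inohP, iQ, ind, iu, icnt⟩
    rw [loopL, hsome]
    apply ih
    have hsubnf : ∀ x ∈ nf, x ∈ v := by
      intro x hx
      have h := (inf x).mp hx
      exact (iV x).mpr ⟨h.1, Or.inr h.2.2⟩
    obtain ⟨sV, snf, snd, sss, snh⟩ := stepL_some_spec dst c ops v nf v' nf' hsubnf hsome
    have hc := iF c (by simp)
    have happ : ∀ (X : List Int), Q ++ (P ++ [c]) ++ X = Q ++ P ++ (c :: X) := by
      intro X; simp
    refine ⟨dn, P ++ [c], Q, rfl, ?_, ?_, snd infd, ?_, fun y hy => iF y (by simp [hy]), ?_, inoh, ?_, iQ, ?_, ?_, ?_⟩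
    · -- iV'
      intro x
      rw [sV x]
      constructor
      · rintro (h | ⟨o, ho, rfl⟩)
        · obtain ⟨hxd, h2⟩ := (iV x).mp h
          refine ⟨hxd, ?_⟩
          rcases h2 with h2 | ⟨y, hyP, o, ho, rfl⟩
          · exact Or.inl h2
          · exact Or.inr ⟨y, by simp [hyP], o, ho, rfl⟩
        · refine ⟨snh o ho, Or.inr ⟨c, by simp, o, ho, rfl⟩⟩
      · rintro ⟨hxd, h | ⟨y, hyPc, o, ho, rfl⟩⟩
        · exact Or.inl ((iV x).mpr ⟨hxd, Or.inl h⟩)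
        · rcases List.mem_append.mp hyPc with hyP | hyc
          · exact Or.inl ((iV _).mpr ⟨hxd, Or.inr ⟨y, hyP, o, ho, rfl⟩⟩)
          · have : y = c := by simpa using hyc
            subst this
            exact Or.inr ⟨o, ho, rfl⟩
    · -- inf'
      intro x
      rw [snf x]
      constructor
      · rintro (h | ⟨hv, o, ho, rfl⟩)
        · obtain ⟨h1, h2, y, hyP, o, ho, rfl⟩ := (inf x).mp h
          exact ⟨h1, h2, y, by simp [hyP], o, ho, rfl⟩
        · refine ⟨snh o ho, ?_, c, by simp, o, ho, rfl⟩
          intro hle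
          exact hv ((iV _).mpr ⟨snh o ho, Or.inl hle⟩)
      · rintro ⟨hxd, hnle, y, hyPc, o, ho, rfl⟩
        rcases List.mem_append.mp hyPc with hyP | hyc
        · exact Or.inl ((inf _).mpr ⟨hxd, hnle, y, hyP, o, ho, rfl⟩)
        · have : y = c := by simpa using hyc
          subst this
          by_cases hv : PySem.Int.bxor y o ∈ v
          · obtain ⟨-, h2⟩ := (iV _).mp hv
            rcases h2 with h2 | ⟨y', hy'P, o', ho', heq⟩
            · exact absurd h2 hnle
            · exact Or.inl ((inf _).mpr ⟨hxd, hnle, y', hy'P, o', ho', heq⟩)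
          · exact Or.inr ⟨hv, o, ho, rfl⟩
    · -- iP'
      intro y hy
      rcases List.mem_append.mp hy with h | h
      · exact iP y h
      · have : y = c := by simpa using h
        subst this
        exact hc
    · -- ilev'
      intro y h1 h2 h3
      have heq2 : P ++ [c] ++ fr = P ++ (c :: fr) := by simp
      rw [heq2]
      exact ilev y h1 h2 h3
    · -- inohP'
      intro y hy o ho
      rcases List.mem_append.mp hy with h | h
      · exact inohP y h o ho
      · have : y = c := by simpa using h
        subst this
        exact snh o ho
    · -- ind'
      rw [happ]
      exact ind
    · -- iu'
      intro x hx
      rw [happ] at hx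
      exact iu x hx
    · -- icnt'
      simp only [List.length_append, List.length_cons] at icnt ⊢
      omega

-- ===== VERDICT (by name: the statement is the Claim_ definition above) =====
theorem bfs_spec : Claim_equal_bfs := by
  intro src dst ops _
  unfold Spec_bfs
  by_cases h : src = dst
  · simp [bfs, bfs_alt, h]
  · rw [bfs, bfs_alt, if_neg h, if_neg h]
    have hA : loopA dst ops (2 ^ ops.length) [(src, 0)] (PySem.Set.ofList [src]) =
        loopL dst ops (2 ^ ops.length) [src] [] (PySem.Set.ofList [src]) 0 := by
      simpa using loop_sim dst ops (2 ^ ops.length) [src] [] (PySem.Set.ofList [src]) 0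
    rw [hA]
    have hS0 : ∀ x, x ∈ PySem.Set.ofList [(0 : Int)] ↔ ReachN 0 ops 0 x := by
      intro x
      rw [PySem.Set.mem_ofList]
      constructor
      · intro hx
        have : x = 0 := by simpa using hx
        exact this
      · intro hx
        have : x = 0 := hx
        simp [this]
    have hinv : ∃ (dn : Nat) (P Q : List Int),
        (0 : Int) = (dn : Int) ∧
        (∀ x, x ∈ PySem.Set.ofList [src] ↔ (x ≠ dst ∧ ((∃ j ≤ dn, ReachN src ops j x) ∨ (∃ y ∈ P, ∃ op ∈ ops, x = PySem.Int.bxor y op)))) ∧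
        (∀ x, x ∈ ([] : List Int) ↔ (x ≠ dst ∧ ¬(∃ j ≤ dn, ReachN src ops j x) ∧ (∃ y ∈ P, ∃ op ∈ ops, x = PySem.Int.bxor y op))) ∧
        ([] : List Int).Nodup ∧
        (∀ y ∈ P, y ≠ dst ∧ ReachN src ops dn y ∧ ¬(∃ j < dn, ReachN src ops j y)) ∧
        (∀ y ∈ [src], y ≠ dst ∧ ReachN src ops dn y ∧ ¬(∃ j < dn, ReachN src ops j y)) ∧
        (∀ y, y ≠ dst → ReachN src ops dn y → ¬(∃ j < dn, ReachN src ops j y) → y ∈ P ++ [src]) ∧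
        (∀ j ≤ dn, ¬ ReachN src ops j dst) ∧
        (∀ y ∈ P, ∀ op ∈ ops, PySem.Int.bxor y op ≠ dst) ∧
        (∀ x ∈ Q, ∃ j ≤ dn, ReachN src ops j x) ∧
        (Q ++ P ++ [src]).Nodup ∧
        (∀ x ∈ Q ++ P ++ [src], x ∈ univList src ops) ∧
        ((univList src ops).length ≤ 2 ^ ops.length + Q.length + P.length) := by
      refine ⟨0, [], [], rfl, ?_, by simp, List.nodup_nil, by simp, ?_, ?_, ?_, by simp, by simp, ?_, ?_, ?_⟩
      · intro x
        rw [PySem.Set.mem_ofList]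
        constructor
        · intro hx
          have hx' : x = src := by simpa using hx
          subst hx'
          exact ⟨h, Or.inl ⟨0, le_rfl, rfl⟩⟩
        · rintro ⟨hxd, ⟨j, hj, hjx⟩ | hstep⟩
          · have hj0 : j = 0 := by omega
            subst hj0
            have : x = src := hjx
            simp [this]
          · simp at hstep
      · intro y hy
        have : y = src := by simpa using hy
        subst this
        exact ⟨h, rfl, by omega⟩
      · intro y _ hy _
        have : y = src := hy
        simp [this]
      · intro j hj hr
        have hj0 : j = 0 := by omega
        subst hj0
        exact h (hr : dst = src).symm
      · simp
      · intro x hx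
        have hx' : x = src := by simpa using hx
        rw [hx']
        have hr0 : ReachN src ops 0 src := rfl
        exact mem_univ hr0
      · have h1 : (univList src ops).length = 2 ^ ops.length := by
          simp [univList, List.length_sublists]
        simp [h1]
    by_cases hex : ∃ k, ReachN src ops k dst
    · haveI : DecidablePred fun k => ReachN src ops k dst := fun _ => Classical.dec _
      have hK : ReachN src ops (Nat.find hex) dst := Nat.find_spec hex
      have hmin : ∀ j < Nat.find hex, ¬ ReachN src ops j dst := fun j hj => Nat.find_min hex hj
      have hK1 : 0 < Nat.find hex := by
        by_contra h0
        have h0' : Nat.find hex = 0 := by omega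
        rw [h0'] at hK
        exact h (hK : dst = src).symm
      have hKn : Nat.find hex ≤ ops.length := by
        obtain ⟨m, hm1, hm2, hm3⟩ := reach_bound h hK
        exact le_trans (Nat.find_min' hex hm3) hm2
      have hB : loopB ops (PySem.Int.bxor src dst) ops.length 1 (PySem.Set.ofList [0]) PySem.Set.empty =
          (Nat.find hex : Int) := by
        have := loopB_hit ops (PySem.Int.bxor src dst) (Nat.find hex)
          ((reach_shift src ops _ dst).mp hK)
          (fun j hj hr => hmin j hj ((reach_shift src ops j dst).mpr hr))
          ops.length 0 (PySem.Set.ofList [0]) PySem.Set.empty hS0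
          (Or.inl ⟨fun x hx => by simp [PySem.Set.empty] at hx, rfl⟩) (by omega) (by omega)
        simpa using this
      rw [hB]
      exact loopL_main src dst ops (Nat.find hex : Int) h
        (Or.inl ⟨Nat.find hex, hK, hmin, rfl⟩)
        (2 ^ ops.length) [src] [] (PySem.Set.ofList [src]) 0 hinv
    · rw [not_exists] at hex
      have hB : loopB ops (PySem.Int.bxor src dst) ops.length 1 (PySem.Set.ofList [0]) PySem.Set.empty = -1 := by
        have := loopB_miss ops (PySem.Int.bxor src dst)
          (fun k hr => hex k ((reach_shift src ops k dst).mpr hr))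
          ops.length 0 (PySem.Set.ofList [0]) PySem.Set.empty hS0
        simpa using this
      rw [hB]
      exact loopL_main src dst ops (-1) h (Or.inr ⟨hex, rfl⟩)
        (2 ^ ops.length) [src] [] (PySem.Set.ofList [src]) 0 hinv
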